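-- pv_equiv track=rewrite | github.com/gsstephenson/cryoem-lattice-subtraction | src/lattice_subtraction/cli.py | get_pytorch_index_url
-- ===== SOURCE A (Python) =====
-- from typing import Optional
--
-- CUDA_INDEX_URLS = {
--     "11.8": "https://download.pytorch.org/whl/cu118",
--     "12.1": "https://download.pytorch.org/whl/cu121",
--     "12.4": "https://download.pytorch.org/whl/cu124",  # Tested
--     "12.6": "https://download.pytorch.org/whl/cu126",
--     "12.8": "https://download.pytorch.org/whl/cu128",
-- }
--
-- CUDA_FALLBACK = {
--     "13.0": "12.8",
--     "13.1": "12.8",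
--     "13.2": "12.8",
-- }
--
-- def get_pytorch_index_url(cuda_version: str) -> Optional[str]:
--     """Get PyTorch index URL for a CUDA version.
--
--     Args:
--         cuda_version: CUDA version string (e.g., "12.4")
--
--     Returns:
--         PyTorch index URL or None if version not supported.
--     """
--     # Try exact match first
--     if cuda_version in CUDA_INDEX_URLS:
--         return CUDA_INDEX_URLS[cuda_version]
--
--     # Check fallback for newer CUDA versions (backward compatible)
--     if cuda_version in CUDA_FALLBACK:
--         fallback = CUDA_FALLBACK[cuda_version]
--         return CUDA_INDEX_URLS.get(fallback)
--
--     # Try major.minor prefix match for minor version differences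
--     major_minor = ".".join(cuda_version.split(".")[:2])
--     for version, url in CUDA_INDEX_URLS.items():
--         if major_minor == ".".join(version.split(".")[:2]):
--             return url
--
--     return None
-- ===== SOURCE B (Python) =====
-- from typing import Optional
--
-- # No URL table: every PyTorch index URL is derived from its major.minor key,
-- # so we keep only the set of supported versions and synthesize the URL.
-- _SUPPORTED = {"11.8", "12.1", "12.4", "12.6", "12.8"}
--
-- _ALIASES = {
--     "13.0": "12.8",
--     "13.1": "12.8",
--     "13.2": "12.8",
-- }
--
-- def get_pytorch_index_url(cuda_version: str) -> Optional[str]: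
--     """Get PyTorch index URL for a CUDA version."""
--     key = _ALIASES.get(cuda_version, ".".join(cuda_version.split(".")[:2]))
--     if key in _SUPPORTED:
--         return "https://download.pytorch.org/whl/cu" + key.replace(".", "")
--     return None
-- ===== Notes on version B (the rewrite author's own statement) =====
-- stated objective: simpler
-- what changed: B removes the key-to-URL dictionary altogether: it resolves aliases, then tests the major.minor string against a plain set of supported versions and synthesizes the URL by string construction ('.../whl/cu' + key without the dot), instead of A's exact-match branch plus item-by-item prefix scan over the URL table.
import Mathlib
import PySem

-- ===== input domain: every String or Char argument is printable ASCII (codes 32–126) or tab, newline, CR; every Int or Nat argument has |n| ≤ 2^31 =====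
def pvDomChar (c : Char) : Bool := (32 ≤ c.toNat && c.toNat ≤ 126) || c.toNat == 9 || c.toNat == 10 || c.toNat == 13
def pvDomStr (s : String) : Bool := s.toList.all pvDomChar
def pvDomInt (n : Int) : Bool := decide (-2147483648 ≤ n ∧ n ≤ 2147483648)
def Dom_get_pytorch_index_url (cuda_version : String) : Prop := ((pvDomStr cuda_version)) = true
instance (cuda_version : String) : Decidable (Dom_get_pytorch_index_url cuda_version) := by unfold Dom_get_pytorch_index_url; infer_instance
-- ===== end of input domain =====

-- B drops the key→URL table entirely: a set of supported major.minor versions plus an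
-- alias map, with the URL synthesized by string construction — simpler data, same values.

-- ===== PORT A =====
def cudaIndexUrls : PySem.Dict String String := PySem.Dict.mk
  [("11.8", "https://download.pytorch.org/whl/cu118"),
   ("12.1", "https://download.pytorch.org/whl/cu121"),
   ("12.4", "https://download.pytorch.org/whl/cu124"),
   ("12.6", "https://download.pytorch.org/whl/cu126"),
   ("12.8", "https://download.pytorch.org/whl/cu128")]

def cudaFallback : PySem.Dict String String := PySem.Dict.mk
  [("13.0", "12.8"), ("13.1", "12.8"), ("13.2", "12.8")]

-- ".".join(x.split(".")[:2]) — exact: split? is `some` here since the separator "." is nonempty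
def majorMinorOf (s : String) : String :=
  PySem.Str.join "." (PySem.List.slice ((PySem.Str.split? s ".").getD []) none (some 2))

-- the 'for version, url in CUDA_INDEX_URLS.items()' prefix scan
def prefixScan (mm : String) : List (String × String) → Option String
  | [] => none
  | (version, url) :: rest =>
      if mm = majorMinorOf version then some url else prefixScan mm rest

def get_pytorch_index_url (cuda_version : String) : Option String :=
  match PySem.Dict.get? cudaIndexUrls cuda_version with
  | some url => some url
  | none =>
    match PySem.Dict.get? cudaFallback cuda_version with
    | some fallback => PySem.Dict.get? cudaIndexUrls fallback
    | none => prefixScan (majorMinorOf cuda_version) cudaIndexUrls.items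

-- ===== PORT B =====
def supportedVersions : PySem.Set String :=
  PySem.Set.ofList ["11.8", "12.1", "12.4", "12.6", "12.8"]

def cudaAliases : PySem.Dict String String := PySem.Dict.mk
  [("13.0", "12.8"), ("13.1", "12.8"), ("13.2", "12.8")]

-- exact: split? is `some` here since the separator "." is nonempty
def majorMinorAlt (s : String) : String :=
  PySem.Str.join "." (PySem.List.slice ((PySem.Str.split? s ".").getD []) none (some 2))

-- "https://download.pytorch.org/whl/cu" + key.replace(".", "")
def urlOfKey (key : String) : String :=
  "https://download.pytorch.org/whl/cu" ++ PySem.Str.replace key "." ""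

def get_pytorch_index_url_alt (cuda_version : String) : Option String :=
  let key := PySem.Dict.getD cudaAliases cuda_version (majorMinorAlt cuda_version)
  if PySem.Set.contains supportedVersions key then some (urlOfKey key) else none

-- ===== PRECONDITION & SPEC =====
def Spec_get_pytorch_index_url (cuda_version : String) (out : Option String) : Prop := out = get_pytorch_index_url_alt cuda_version
instance (cuda_version : String) (out : Option String) : Decidable (Spec_get_pytorch_index_url cuda_version out) := by unfold Spec_get_pytorch_index_url; infer_instance

-- ===== CLAIM =====
def Claim_equal_get_pytorch_index_url : Prop := ∀ (cuda_version : String), Dom_get_pytorch_index_url cuda_version → Spec_get_pytorch_index_url cuda_version (get_pytorch_index_url cuda_version)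

-- ===== LEMMAS AND PROOFS =====

-- A's prefix scan over the table equals B's "supported set + synthesized URL" test.
theorem scan_eq_synth (mm : String) :
    prefixScan mm cudaIndexUrls.items =
      (if PySem.Set.contains supportedVersions mm then some (urlOfKey mm) else none) := by
  by_cases h1 : mm = "11.8"; · subst h1; rfl
  by_cases h2 : mm = "12.1"; · subst h2; rfl
  by_cases h3 : mm = "12.4"; · subst h3; rfl
  by_cases h4 : mm = "12.6"; · subst h4; rfl
  by_cases h5 : mm = "12.8"; · subst h5; rfl
  have e1 : majorMinorOf "11.8" = "11.8" := by rfl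
  have e2 : majorMinorOf "12.1" = "12.1" := by rfl
  have e3 : majorMinorOf "12.4" = "12.4" := by rfl
  have e4 : majorMinorOf "12.6" = "12.6" := by rfl
  have e5 : majorMinorOf "12.8" = "12.8" := by rfl
  have hc : PySem.Set.contains supportedVersions mm = false := by
    simp [supportedVersions, PySem.Set.contains, PySem.Set.ofList, PySem.Set.add,
      h1, h2, h3, h4, h5]
  simp only [cudaIndexUrls, prefixScan, e1, e2, e3, e4, e5,
    if_neg h1, if_neg h2, if_neg h3, if_neg h4, if_neg h5, hc, if_false, Bool.false_eq_true]

-- ===== VERDICT =====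
theorem get_pytorch_index_url_spec : Claim_equal_get_pytorch_index_url := by
  intro s _
  unfold Spec_get_pytorch_index_url get_pytorch_index_url get_pytorch_index_url_alt
  by_cases h1 : s = "11.8"; · subst h1; rfl
  by_cases h2 : s = "12.1"; · subst h2; rfl
  by_cases h3 : s = "12.4"; · subst h3; rfl
  by_cases h4 : s = "12.6"; · subst h4; rfl
  by_cases h5 : s = "12.8"; · subst h5; rfl
  by_cases f1 : s = "13.0"; · subst f1; rfl
  by_cases f2 : s = "13.1"; · subst f2; rfl
  by_cases f3 : s = "13.2"; · subst f3; rfl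
  have hA : PySem.Dict.get? cudaIndexUrls s = none := by
    simp [cudaIndexUrls, beq_iff_eq, Ne.symm h1, Ne.symm h2, Ne.symm h3,
      Ne.symm h4, Ne.symm h5, PySem.Dict.get?]
  have hF : PySem.Dict.get? cudaFallback s = none := by
    simp [cudaFallback, beq_iff_eq, Ne.symm f1, Ne.symm f2, Ne.symm f3, PySem.Dict.get?]
  have hG : PySem.Dict.get? cudaAliases s = none := by
    simp [cudaAliases, beq_iff_eq, Ne.symm f1, Ne.symm f2, Ne.symm f3, PySem.Dict.get?]
  have hmm : majorMinorAlt s = majorMinorOf s := rfl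
  simp only [hA, hF, PySem.Dict.getD, hG, Option.getD_none, hmm, scan_eq_synth]
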